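-- pv_equiv track=rewrite | github.com/allenfbyrd/evidentia | packages/controlbridge-collectors/src/controlbridge_collectors/aws/mapping.py | _normalize_rule_name
-- ===== SOURCE A (Python) =====
-- def _normalize_rule_name(raw: str) -> str:
--     """Lowercase + hyphen-separate a Config rule name.
--
--     ``S3BucketPublicReadProhibited`` -> ``s3-bucket-public-read-prohibited``
--     ``s3-bucket-public-read-prohibited`` -> unchanged.
--     """
--     if not raw:
--         return ""
--     out: list[str] = []
--     for i, ch in enumerate(raw):
--         if ch.isupper() and i > 0 and raw[i - 1] != "-":
--             out.append("-")
--         out.append(ch.lower())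
--     return "".join(out).replace("_", "-")
-- ===== SOURCE B (Python) =====
-- def _normalize_rule_name(raw: str) -> str:
--     # Staged split-and-join: compute the word-boundary cut positions, slice the
--     # string at them, join the slices with '-', then lowercase and map '_'->'-'.
--     n = len(raw)
--     cuts = [i for i in range(1, n) if raw[i].isupper() and raw[i - 1] != '-']
--     bounds = [0] + cuts + [n]
--     parts = [raw[a:b] for a, b in zip(bounds, bounds[1:])]
--     return '-'.join(parts).lower().replace('_', '-')
-- ===== Notes on version B (the rewrite author's own statement) =====
-- stated objective: alternative
-- what changed: Replaces A's single-pass character loop with an accumulator by a staged split-and-join: first compute the list of boundary indices (uppercase not preceded by '-'), then slice the string at those bounds, join the slices with '-', and lowercase/replace once at the end.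
import Mathlib
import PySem

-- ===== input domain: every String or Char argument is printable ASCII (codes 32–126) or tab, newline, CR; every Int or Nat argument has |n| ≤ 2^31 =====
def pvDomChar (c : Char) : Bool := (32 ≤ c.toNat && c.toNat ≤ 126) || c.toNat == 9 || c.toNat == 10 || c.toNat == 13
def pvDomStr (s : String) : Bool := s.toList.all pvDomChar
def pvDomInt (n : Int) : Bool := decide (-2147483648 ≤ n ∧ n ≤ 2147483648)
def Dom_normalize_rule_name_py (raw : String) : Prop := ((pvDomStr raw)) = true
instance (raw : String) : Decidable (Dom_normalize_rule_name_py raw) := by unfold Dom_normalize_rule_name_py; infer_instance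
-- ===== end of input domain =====

-- B replaces A's single-pass character loop by a staged split-and-join: compute the
-- boundary indices, slice the string there, '-'.join the slices, then lowercase/replace once.

-- ===== PORT A =====
-- loop body: 'if ch.isupper() and i > 0 and raw[i-1] != "-": out.append("-")' then 'out.append(ch.lower())'
def normalize_rule_name_py (raw : String) : String :=
  if raw = "" then ""
  else
    let cs := raw.toList
    let out : List Char :=
      (PySem.List.enumerate cs 0).foldl
        (fun out p =>
          (if PySem.Chars.isupper p.2 ∧ p.1 > 0 ∧ PySem.List.pyGet? cs (p.1 - 1) ≠ some '-'
           then out ++ ['-'] else out) ++ [PySem.Chars.lowerChar p.2]) []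
    PySem.Str.replace (String.ofList out) "_" "-"

-- ===== PORT B =====
-- the comprehension's test 'raw[i].isupper() and raw[i-1] != "-"' (both indices in range)
def pvPredB (cs : List Char) (i : Int) : Bool :=
  match PySem.List.pyGet? cs i, PySem.List.pyGet? cs (i - 1) with
  | some c, some p => PySem.Chars.isupper c && (p != '-')
  | _, _ => false

-- cuts = [...]; bounds = [0] + cuts + [n]; parts = [raw[a:b] for a, b in zip(bounds, bounds[1:])]
def normalize_rule_name_py_alt (raw : String) : String :=
  let cs := raw.toList
  let n : Int := PySem.Str.len raw
  let cuts : List Int := (PySem.List.pyRange 1 n 1).filter (pvPredB cs)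
  let bounds : List Int := 0 :: cuts ++ [n]
  let parts : List (List Char) :=
    (bounds.zip bounds.tail).map (fun ab => PySem.List.slice cs (some ab.1) (some ab.2))
  PySem.Str.replace (PySem.Str.lower (String.ofList (PySem.Chars.join ['-'] parts))) "_" "-"

-- ===== PRECONDITION & SPEC =====
def Spec_normalize_rule_name_py (raw : String) (out : String) : Prop := out = normalize_rule_name_py_alt raw
instance (raw : String) (out : String) : Decidable (Spec_normalize_rule_name_py raw out) := by unfold Spec_normalize_rule_name_py; infer_instance

-- ===== CLAIM (what is proved, stated in full; the proofs are below) =====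
def Claim_equal_normalize_rule_name_py : Prop := ∀ (raw : String), Dom_normalize_rule_name_py raw → Spec_normalize_rule_name_py raw (normalize_rule_name_py raw)

-- ===== LEMMAS AND PROOFS =====

-- A's loop body, with the full character list cs fixed
def pvBodyA (cs : List Char) (out : List Char) (p : Int × Char) : List Char :=
  (if PySem.Chars.isupper p.2 ∧ p.1 > 0 ∧ PySem.List.pyGet? cs (p.1 - 1) ≠ some '-'
   then out ++ ['-'] else out) ++ [PySem.Chars.lowerChar p.2]

-- the (unlowered) piece contributed for a character with its predecessor
def pvPiece (pc : Char × Char) : List Char :=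
  if PySem.Chars.isupper pc.2 ∧ pc.1 ≠ '-' then ['-', pc.2] else [pc.2]

-- the same piece, lowered (what A appends)
def pvPieceB (pc : Char × Char) : List Char := (pvPiece pc).map PySem.Chars.lowerChar

lemma pvKey (cs : List Char) (suffix : List Char) : ∀ (n : Nat) (prev : Char) (acc : List Char),
    cs.drop n = prev :: suffix →
    (PySem.List.enumerate suffix ((n : Int) + 1)).foldl (pvBodyA cs) acc
      = acc ++ ((prev :: suffix).zip suffix).flatMap pvPieceB := by
  induction suffix with
  | nil => intro n prev acc h; simp [PySem.List.enumerate_nil]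
  | cons c s' ih =>
    intro n prev acc h
    have hn : cs[n]? = some prev := by
      have := congrArg List.head? h
      simpa [List.head?_drop] using this
    have hdrop : cs.drop (n + 1) = c :: s' := by
      have := congrArg List.tail h
      simpa [List.tail_drop] using this
    rw [PySem.List.enumerate_cons, List.foldl_cons]
    have hstep : pvBodyA cs acc ((n : Int) + 1, c)
        = acc ++ pvPieceB (prev, c) := by
      unfold pvBodyA pvPieceB pvPiece
      have hpos : ((n : Int) + 1) > 0 := by positivity
      have hl : PySem.Chars.lowerChar '-' = '-' := by decide
      by_cases hu : PySem.Chars.isupper c = true <;> by_cases hp : prev = '-' <;>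
        simp [hn, hpos, hu, hp, hl]
    rw [hstep]
    have hih := ih (n + 1) c (acc ++ pvPieceB (prev, c)) hdrop
    push_cast at hih
    rw [hih]
    simp [List.zip_cons_cons, List.flatMap_cons]

lemma pvFoldA_eq (c0 : Char) (rest : List Char) :
    (PySem.List.enumerate (c0 :: rest) 0).foldl (pvBodyA (c0 :: rest)) []
      = PySem.Chars.lowerChar c0 :: ((c0 :: rest).zip rest).flatMap pvPieceB := by
  rw [PySem.List.enumerate_cons, List.foldl_cons]
  have h0 : pvBodyA (c0 :: rest) [] (0, c0) = [PySem.Chars.lowerChar c0] := by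
    unfold pvBodyA; simp
  rw [h0]
  have := pvKey (c0 :: rest) rest 0 c0 [PySem.Chars.lowerChar c0] (by simp)
  simpa using this

-- B's cut list over Nat indices, starting at m
def pvCutsN (cs : List Char) (m : Nat) : List Nat :=
  (List.range' m (cs.length - m)).filter (fun i => pvPredB cs (i : Int))

-- B's slices at a Nat bounds list
def pvPartsN (cs : List Char) (bs : List Nat) : List (List Char) :=
  (bs.zip bs.tail).map (fun ab => (cs.drop ab.1).take (ab.2 - ab.1))

lemma pvJoinConsHead (sep : List Char) (x : Char) (a : List Char) (t : List (List Char)) :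
    PySem.Chars.join sep ((x :: a) :: t) = x :: PySem.Chars.join sep (a :: t) := by
  cases t with
  | nil => rw [PySem.Chars.join_singleton, PySem.Chars.join_singleton]
  | cons q r => rw [PySem.Chars.join_cons_cons, PySem.Chars.join_cons_cons]; simp

lemma pvCutsN_step (cs : List Char) (m : Nat) (hm : m < cs.length) :
    pvCutsN cs m
      = (if pvPredB cs (m : Int) then [m] else []) ++ pvCutsN cs (m + 1) := by
  unfold pvCutsN
  have h : cs.length - m = (cs.length - (m + 1)) + 1 := by omega
  rw [h, List.range'_succ, List.filter_cons]
  split <;> simp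

lemma pvCutsN_head_ge (cs : List Char) (m h : Nat) (t : List Nat)
    (hc : pvCutsN cs m ++ [cs.length] = h :: t) (hm : m ≤ cs.length) : m ≤ h := by
  cases hcut : pvCutsN cs m with
  | nil =>
    rw [hcut, List.nil_append] at hc
    injection hc with h1 _
    omega
  | cons a r =>
    rw [hcut, List.cons_append] at hc
    injection hc with h1 _
    have ha' : a ∈ List.range' m (cs.length - m) := by
      have ha : a ∈ pvCutsN cs m := by rw [hcut]; exact List.mem_cons_self
      unfold pvCutsN at ha
      exact List.mem_of_mem_filter ha
    have := (List.mem_range'_1.mp ha').1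
    omega

lemma pvJoinB (cs : List Char) (suffix : List Char) : ∀ (j : Nat) (prev : Char),
    cs.drop j = prev :: suffix →
    PySem.Chars.join ['-'] (pvPartsN cs (j :: pvCutsN cs (j + 1) ++ [cs.length]))
      = prev :: ((prev :: suffix).zip suffix).flatMap pvPiece := by
  induction suffix with
  | nil =>
    intro j prev h
    have hlen : cs.length = j + 1 := by
      have := congrArg List.length h
      simp [List.length_drop] at this
      omega
    have hcuts : pvCutsN cs (j + 1) = [] := by
      unfold pvCutsN; rw [hlen]; simp
    rw [hcuts, hlen]
    unfold pvPartsN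
    simp [PySem.Chars.join_singleton, h, show j + 1 - j = 1 from by omega]
  | cons c s' ih =>
    intro j prev h
    have hn : cs[j]? = some prev := by
      have := congrArg List.head? h
      simpa [List.head?_drop] using this
    have hdrop : cs.drop (j + 1) = c :: s' := by
      have := congrArg List.tail h
      simpa [List.tail_drop] using this
    have hn1 : cs[j + 1]? = some c := by
      have := congrArg List.head? hdrop
      simpa [List.head?_drop] using this
    have hlen : cs.length = j + 2 + s'.length := by
      have := congrArg List.length h
      simp [List.length_drop] at this
      omega
    have hpred : pvPredB cs ((j + 1 : Nat) : Int)
        = (PySem.Chars.isupper c && (prev != '-')) := by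
      unfold pvPredB
      have h1 : PySem.List.pyGet? cs ((j + 1 : Nat) : Int) = some c := by
        rw [PySem.List.pyGet?_natCast]; exact hn1
      have h2 : PySem.List.pyGet? cs (((j + 1 : Nat) : Int) - 1) = some prev := by
        have : (((j + 1 : Nat) : Int) - 1) = ((j : Nat) : Int) := by push_cast; ring
        rw [this, PySem.List.pyGet?_natCast]; exact hn
      rw [h1, h2]
    have hstep := pvCutsN_step cs (j + 1) (by omega)
    obtain ⟨hh, tt, hL⟩ : ∃ hh tt, pvCutsN cs (j + 2) ++ [cs.length] = hh :: tt := by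
      cases pvCutsN cs (j + 2) <;> exact ⟨_, _, rfl⟩
    have hih := ih (j + 1) c hdrop
    by_cases hp : (PySem.Chars.isupper c && (prev != '-')) = true
    · -- cut at j+1
      have hcuts : pvCutsN cs (j + 1) = (j + 1) :: pvCutsN cs (j + 2) := by
        rw [hstep]; rw [hpred, hp]; simp
      rw [hcuts]
      -- bounds j :: (j+1) :: hh :: tt
      have hb : (j :: ((j + 1) :: pvCutsN cs (j + 2)) ++ [cs.length])
          = j :: (j + 1) :: (pvCutsN cs (j + 2) ++ [cs.length]) := by simp
      rw [hb, hL]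
      unfold pvPartsN
      simp only [List.tail_cons, List.zip_cons_cons, List.map_cons]
      rw [show j + 1 - j = 1 by omega, h]
      simp only [List.take_succ_cons, List.take_zero]
      rw [PySem.Chars.join_cons_cons]
      have hihe : PySem.Chars.join ['-']
          (pvPartsN cs ((j + 1) :: pvCutsN cs (j + 2) ++ [cs.length]))
            = c :: ((c :: s').zip s').flatMap pvPiece := hih
      rw [List.cons_append, hL] at hihe
      unfold pvPartsN at hihe
      simp only [List.tail_cons, List.zip_cons_cons, List.map_cons] at hihe
      rw [hihe]
      have hpiece : pvPiece (prev, c) = ['-', c] := by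
        unfold pvPiece
        simp only [Bool.and_eq_true, bne_iff_ne] at hp
        simp [hp.1, hp.2]
      simp [hpiece]
    · -- no cut at j+1
      have hcuts : pvCutsN cs (j + 1) = pvCutsN cs (j + 2) := by
        rw [hstep]; rw [hpred]
        simp only [hp]; simp
      rw [hcuts]
      have hb : (j :: pvCutsN cs (j + 2) ++ [cs.length])
          = j :: (pvCutsN cs (j + 2) ++ [cs.length]) := by simp
      rw [hb, hL]
      have hge : j + 2 ≤ hh := pvCutsN_head_ge cs (j + 2) hh tt hL (by omega)
      unfold pvPartsN
      simp only [List.tail_cons, List.zip_cons_cons, List.map_cons]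
      have hsplit : (cs.drop j).take (hh - j) = prev :: (cs.drop (j + 1)).take (hh - (j + 1)) := by
        rw [h, show hh - j = (hh - (j + 1)) + 1 by omega, List.take_succ_cons]
        rw [hdrop]
      rw [hsplit, pvJoinConsHead]
      have hihe : PySem.Chars.join ['-']
          (pvPartsN cs ((j + 1) :: pvCutsN cs (j + 2) ++ [cs.length]))
            = c :: ((c :: s').zip s').flatMap pvPiece := hih
      rw [List.cons_append, hL] at hihe
      unfold pvPartsN at hihe
      simp only [List.tail_cons, List.zip_cons_cons, List.map_cons] at hihe
      rw [hihe]
      have hpiece : pvPiece (prev, c) = [c] := by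
        unfold pvPiece
        simp only [Bool.and_eq_true, bne_iff_ne] at hp
        by_cases hu : PySem.Chars.isupper c = true <;> by_cases hq : prev = '-' <;>
          simp [hu, hq] at hp ⊢
      simp [hpiece]

-- B's Int-level cut list is the Nat one, cast
lemma pvCuts_eq (cs : List Char) :
    (PySem.List.pyRange 1 (cs.length : Int) 1).filter (pvPredB cs)
      = (pvCutsN cs 1).map (fun i : Nat => (i : Int)) := by
  rw [PySem.List.pyRange_one]
  have ht : (((cs.length : Int)) - 1).toNat = cs.length - 1 := by omega
  rw [ht]
  have hm : (List.range (cs.length - 1)).map (fun k : Nat => (1 : Int) + k)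
      = ((List.range (cs.length - 1)).map (fun k => 1 + k)).map (fun i : Nat => (i : Int)) := by
    rw [List.map_map]
    apply List.map_congr_left
    intro k _
    simp only [Function.comp_apply]
    push_cast
    ring
  rw [hm, List.filter_map]
  unfold pvCutsN
  rw [List.range'_eq_map_range]
  rw [show (pvPredB cs ∘ fun i : Nat => (i : Int)) = (fun i : Nat => pvPredB cs (i : Int)) from rfl]

theorem pv_main (raw : String) :
    normalize_rule_name_py raw = normalize_rule_name_py_alt raw := by
  unfold normalize_rule_name_py normalize_rule_name_py_alt
  by_cases h : raw = ""
  · subst h; decide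
  · simp only [h, if_false]
    obtain ⟨c0, rest, hcs⟩ : ∃ c0 rest, raw.toList = c0 :: rest := by
      cases hx : raw.toList with
      | nil => exact absurd (String.toList_eq_nil_iff.mp hx) h
      | cons a l => exact ⟨a, l, rfl⟩
    have hlenr : PySem.Str.len raw = ((raw.toList.length : Int)) := by
      simp [PySem.Str.len_eq]
    rw [hlenr, hcs]
    set cs := c0 :: rest with hcsdef
    -- A's fold
    have hA : (PySem.List.enumerate cs 0).foldl
        (fun out p =>
          (if PySem.Chars.isupper p.2 ∧ p.1 > 0 ∧ PySem.List.pyGet? cs (p.1 - 1) ≠ some '-'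
           then out ++ ['-'] else out) ++ [PySem.Chars.lowerChar p.2]) []
        = PySem.Chars.lowerChar c0 :: (cs.zip rest).flatMap pvPieceB := pvFoldA_eq c0 rest
    rw [hA]
    -- B's parts, reduced to Nat level
    have hbounds : ((0 : Int) :: (PySem.List.pyRange 1 (cs.length : Int) 1).filter (pvPredB cs)
          ++ [(cs.length : Int)])
        = ((0 : Nat) :: pvCutsN cs 1 ++ [cs.length]).map (fun i : Nat => (i : Int)) := by
      rw [pvCuts_eq]
      simp
    have hparts : ((((0 : Int) :: (PySem.List.pyRange 1 (cs.length : Int) 1).filter (pvPredB cs)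
          ++ [(cs.length : Int)]).zip
          (((0 : Int) :: (PySem.List.pyRange 1 (cs.length : Int) 1).filter (pvPredB cs)
          ++ [(cs.length : Int)]).tail)).map
          (fun ab => PySem.List.slice cs (some ab.1) (some ab.2)))
        = pvPartsN cs ((0 : Nat) :: pvCutsN cs 1 ++ [cs.length]) := by
      rw [hbounds]
      rw [show (((0 : Nat) :: pvCutsN cs 1 ++ [cs.length]).map (fun i : Nat => (i : Int))).tail
          = ((0 : Nat) :: pvCutsN cs 1 ++ [cs.length]).tail.map (fun i : Nat => (i : Int)) by
        simp]
      rw [List.zip_map, List.map_map]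
      unfold pvPartsN
      apply List.map_congr_left
      intro ab _
      simp [PySem.List.slice_natCast]
    rw [hparts]
    have hjoin := pvJoinB cs rest 0 c0 (by simp [hcsdef])
    have hcuts01 : pvCutsN cs (0 + 1) = pvCutsN cs 1 := by norm_num
    rw [hcuts01] at hjoin
    rw [hjoin]
    -- lower the joined string and compare
    have hlow : PySem.Chars.lower (c0 :: (cs.zip rest).flatMap pvPiece)
        = PySem.Chars.lowerChar c0 :: (cs.zip rest).flatMap pvPieceB := by
      simp only [PySem.Chars.lower, List.map_cons, List.map_flatMap]
      refine congrArg _ (List.flatMap_congr fun pc _ => ?_)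
      simp [pvPieceB]
    have hS : PySem.Str.lower (String.ofList (c0 :: (cs.zip rest).flatMap pvPiece))
        = String.ofList (PySem.Chars.lowerChar c0 :: (cs.zip rest).flatMap pvPieceB) := by
      apply String.ext
      rw [PySem.Str.toList_lower, String.toList_ofList, String.toList_ofList]
      exact hlow
    rw [hS]

-- ===== VERDICT (by name: the statement is the Claim_ definition above) =====
theorem normalize_rule_name_py_spec : Claim_equal_normalize_rule_name_py := by
  intro raw _
  exact pv_main raw
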